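-- pv_equiv track=rewrite | github.com/HypenauticPulse/HypeCAS | linearalgebra/matrixoperations.py | matrix_sub
-- ===== SOURCE A (Python) =====
-- def matrix_add(matrix_a, matrix_b):
--     if len(matrix_a) != len(matrix_b) or len(matrix_a[0]) != len(matrix_b[0]):
--         raise ValueError(
--             "Dimension mismatch for addition between {}x{} and {}x{} matrices.".format(len(matrix_a), len(matrix_a[0]),
--                                                                                        len(matrix_b), len(matrix_b[0])))
--     else:
--         result = []
--         for i in range(len(matrix_a)):
--             row_result = []
--             for j in range(len(matrix_a[0])):
--                 row_result.append(matrix_a[i][j] + matrix_b[i][j])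
--             result.append(row_result)
--     return result
--
-- def matrix_sub(matrix_a, matrix_b):
--     if len(matrix_a) != len(matrix_b) or len(matrix_a[0]) != len(matrix_b[0]):
--         raise ValueError(
--             "Dimension mismatch for subtraction between {}x{} and {}x{} matrices.".format(len(matrix_a),
--                                                                                           len(matrix_a[0]),
--                                                                                           len(matrix_b),
--                                                                                           len(matrix_b[0])))
--     else:
--         temp = []
--         for i in range(len(matrix_a)):
--             row_temp = []
--             for j in range(len(matrix_a[0])):
--                 row_temp.append(- matrix_b[i][j])
--             temp.append(row_temp)
--     return matrix_add(matrix_a, temp)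
-- ===== SOURCE B (Python) =====
-- def matrix_sub(matrix_a, matrix_b):
--     if len(matrix_a) != len(matrix_b) or len(matrix_a[0]) != len(matrix_b[0]):
--         raise ValueError(
--             "Dimension mismatch for subtraction between {}x{} and {}x{} matrices.".format(len(matrix_a),
--                                                                                           len(matrix_a[0]),
--                                                                                           len(matrix_b),
--                                                                                           len(matrix_b[0])))
--     return [[x - y for x, y in zip(row_a, row_b)] for row_a, row_b in zip(matrix_a, matrix_b)]
-- ===== Notes on version B (the rewrite author's own statement) =====
-- stated objective: simpler
-- what changed: B drops the negated temp matrix and the matrix_add delegation, computing the difference directly with one zip-based comprehension over paired rows.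
-- outside the precondition, e.g. on matrix_sub([[1], [2, 9]], [[1], [2, 3]]): A returns [[0], [0]], B returns [[0], [0, 6]]
import Mathlib
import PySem

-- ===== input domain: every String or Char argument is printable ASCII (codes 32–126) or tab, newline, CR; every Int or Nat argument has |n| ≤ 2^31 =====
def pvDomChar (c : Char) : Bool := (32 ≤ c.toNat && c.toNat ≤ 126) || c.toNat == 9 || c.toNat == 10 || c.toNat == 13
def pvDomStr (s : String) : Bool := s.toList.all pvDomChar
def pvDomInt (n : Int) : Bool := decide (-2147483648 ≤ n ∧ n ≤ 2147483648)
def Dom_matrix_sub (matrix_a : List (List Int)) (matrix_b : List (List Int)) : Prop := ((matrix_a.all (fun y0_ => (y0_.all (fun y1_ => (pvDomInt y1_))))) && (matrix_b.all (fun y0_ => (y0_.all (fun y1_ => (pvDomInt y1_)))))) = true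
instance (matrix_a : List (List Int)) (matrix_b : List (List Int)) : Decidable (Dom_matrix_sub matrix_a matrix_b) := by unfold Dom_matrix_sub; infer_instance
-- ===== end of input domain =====

-- B replaces the negate-then-matrix_add two-pass computation by a single zip-based
-- elementwise subtraction; equal behaviour on nonempty equal-shape rectangular matrices.

-- ===== PORT A =====
-- helper of A: matrix_add (the guard raises outside Pre_, so only the else branch is ported)
def matrix_add (matrix_a : List (List Int)) (matrix_b : List (List Int)) : List (List Int) :=
  (PySem.List.pyRange 0 (matrix_a.length : Int) 1).foldl
    (fun result i =>
      result ++ [(PySem.List.pyRange 0 ((PySem.List.pyGetD matrix_a 0 []).length : Int) 1).foldl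
        (fun row_result j =>
          row_result ++ [PySem.List.pyGetD (PySem.List.pyGetD matrix_a i []) j 0
                         + PySem.List.pyGetD (PySem.List.pyGetD matrix_b i []) j 0]) []]) []

def matrix_sub (matrix_a : List (List Int)) (matrix_b : List (List Int)) : List (List Int) :=
  -- the dimension guard raises ValueError; those inputs are outside Pre_matrix_sub
  let temp := (PySem.List.pyRange 0 (matrix_a.length : Int) 1).foldl
    (fun temp i =>
      temp ++ [(PySem.List.pyRange 0 ((PySem.List.pyGetD matrix_a 0 []).length : Int) 1).foldl
        (fun row_temp j =>
          row_temp ++ [-(PySem.List.pyGetD (PySem.List.pyGetD matrix_b i []) j 0)]) []]) []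
  matrix_add matrix_a temp

-- ===== PORT B =====
def matrix_sub_alt (matrix_a : List (List Int)) (matrix_b : List (List Int)) : List (List Int) :=
  (matrix_a.zip matrix_b).map (fun rp => (rp.1.zip rp.2).map (fun p => p.1 - p.2))

-- ===== PRECONDITION & SPEC =====
-- Pre_ excludes the shape-mismatch and empty inputs on which A raises (ValueError / IndexError),
-- and ragged inputs (a row longer than row 0) on which A's silent truncation to the first row's
-- width and B's pairwise zip are both accidental behaviours on non-matrices.
def Pre_matrix_sub (matrix_a : List (List Int)) (matrix_b : List (List Int)) : Prop :=
  matrix_a ≠ [] ∧ matrix_a.length = matrix_b.length ∧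
    ∀ r ∈ matrix_a ++ matrix_b, r.length = (matrix_a.headD []).length
instance (matrix_a : List (List Int)) (matrix_b : List (List Int)) : Decidable (Pre_matrix_sub matrix_a matrix_b) := by unfold Pre_matrix_sub; infer_instance

def pvWitness_matrix_sub : List (List Int) × List (List Int) := ([[1, 2], [3, 4]], [[5, 6], [7, 8]])
def Spec_matrix_sub (matrix_a : List (List Int)) (matrix_b : List (List Int)) (out : List (List Int)) : Prop := out = matrix_sub_alt matrix_a matrix_b
instance (matrix_a : List (List Int)) (matrix_b : List (List Int)) (out : List (List Int)) : Decidable (Spec_matrix_sub matrix_a matrix_b out) := by unfold Spec_matrix_sub; infer_instance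

-- ===== CLAIM (what is proved, stated in full; the proofs are below) =====
def Claim_equal_matrix_sub : Prop := ∀ (matrix_a : List (List Int)) (matrix_b : List (List Int)), Dom_matrix_sub matrix_a matrix_b → Pre_matrix_sub matrix_a matrix_b → Spec_matrix_sub matrix_a matrix_b (matrix_sub matrix_a matrix_b)

-- ===== LEMMAS AND PROOFS =====

-- ===== VERDICT (by name: the statement is the Claim_ definition above) =====
theorem matrix_sub_spec : Claim_equal_matrix_sub := by
  intro a b _ hpre
  obtain ⟨-, hlen, hrect⟩ := hpre
  unfold Spec_matrix_sub
  simp only [matrix_sub, matrix_add, matrix_sub_alt,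
    PySem.List.foldl_append_singleton_eq_map, List.nil_append]
  apply List.ext_getElem
  · simp [PySem.List.length_pyRange_one, hlen]
  · intro i hi hi2
    simp only [List.getElem_map, PySem.List.getElem_pyRange_one, zero_add,
      List.getElem_zip]
    simp only [List.length_map, List.length_zip, PySem.List.length_pyRange_one,
      Int.sub_zero, Int.toNat_natCast, hlen, Nat.min_self] at hi hi2
    have hib : i < b.length := hi2
    have hia : i < a.length := by omega
    rw [PySem.List.pyGetD_map_pyRange _ a.length i _ hia]
    have hwa : a[i].length = (a.headD []).length :=
      hrect _ (List.mem_append_left _ (List.getElem_mem hia))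
    have hwb : b[i].length = (a.headD []).length :=
      hrect _ (List.mem_append_right _ (List.getElem_mem hib))
    have hw0 : (PySem.List.pyGetD a 0 []).length = (a.headD []).length := by
      simp [PySem.List.pyGetD_zero, List.getD, List.headD]
      cases a with
      | nil => rfl
      | cons x xs => rfl
    apply List.ext_getElem
    · simp [PySem.List.length_pyRange_one, hw0, hwa, hwb]
    · intro j hj hj2
      simp only [List.getElem_map, PySem.List.getElem_pyRange_one, zero_add,
        List.getElem_zip]
      simp only [List.length_map, PySem.List.length_pyRange_one, Int.sub_zero,
        Int.toNat_natCast, hw0] at hj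
      have hja : j < a[i].length := hwa ▸ hj
      have hjb : j < b[i].length := hwb ▸ hj
      rw [PySem.List.pyGetD_map_pyRange _ _ j _ (hw0 ▸ hj)]
      simp only [PySem.List.pyGetD_natCast, List.getD_eq_getElem _ _ hia,
        List.getD_eq_getElem _ _ hib, List.getD_eq_getElem _ _ hja,
        List.getD_eq_getElem _ _ hjb]
      ring
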